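-- pv_equiv track=rewrite | github.com/D33pBlue/Music-Maze | maze.py | contiene_caratteri_non_conformi
-- ===== SOURCE A (Python) =====
-- def contiene_caratteri_non_conformi(riga,indice_riga):
-- 	indice_colonna=0
-- 	for e in riga:
-- 		if indice_riga%2==1:
-- 			if e != ' ' and e != '*':
-- 				return True
-- 		else:
-- 			if indice_colonna%2==1 and e != ' ' and e != '*':
-- 				return True
-- 		indice_colonna+=1
-- 	return False
-- ===== SOURCE B (Python) =====
-- def contiene_caratteri_non_conformi(riga, indice_riga):
--     if indice_riga % 2 == 1:
--         return any(e != ' ' and e != '*' for e in riga)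
--     return any(e != ' ' and e != '*' for e in riga[1::2])
-- ===== Notes on version B (the rewrite author's own statement) =====
-- stated objective: simpler
-- what changed: Hoists the row-parity decision out of the loop and replaces the index-threaded scan with any() over the whole string (odd rows) or over the stride-2 slice riga[1::2] (even rows), eliminating the column counter.
import Mathlib
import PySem

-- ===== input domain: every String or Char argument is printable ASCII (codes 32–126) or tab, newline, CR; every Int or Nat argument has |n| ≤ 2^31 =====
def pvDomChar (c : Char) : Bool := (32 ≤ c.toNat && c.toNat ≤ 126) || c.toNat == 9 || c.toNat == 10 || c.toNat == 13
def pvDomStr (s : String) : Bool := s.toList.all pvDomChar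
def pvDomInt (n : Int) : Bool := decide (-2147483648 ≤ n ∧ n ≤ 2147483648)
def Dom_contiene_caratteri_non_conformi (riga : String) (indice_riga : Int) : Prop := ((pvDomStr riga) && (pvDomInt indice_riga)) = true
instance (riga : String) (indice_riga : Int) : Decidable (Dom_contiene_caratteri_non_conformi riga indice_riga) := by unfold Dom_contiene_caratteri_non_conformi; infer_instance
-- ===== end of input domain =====

-- B hoists the row-parity test out of the loop and scans the whole string (odd rows)
-- or only the odd columns (even rows), dropping the column counter; objective: simpler.

-- ===== PORT A =====
-- the for-loop over riga with the running indice_colonna counter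
def pvLoopA (indice_riga : Int) : List Char → Int → Bool
  | [], _ => false
  | e :: rest, indice_colonna =>
    if PySem.Int.mod indice_riga 2 == 1 then
      if e != ' ' && e != '*' then true
      else pvLoopA indice_riga rest (indice_colonna + 1)
    else
      if PySem.Int.mod indice_colonna 2 == 1 && e != ' ' && e != '*' then true
      else pvLoopA indice_riga rest (indice_colonna + 1)

def contiene_caratteri_non_conformi (riga : String) (indice_riga : Int) : Bool :=
  pvLoopA indice_riga riga.toList 0

-- ===== PORT B =====
-- riga[1::2]: the characters at odd indices (port of the stride-2 slice)
def pvOddCols : List Char → List Char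
  | _ :: e :: rest => e :: pvOddCols rest
  | _ => []

def contiene_caratteri_non_conformi_alt (riga : String) (indice_riga : Int) : Bool :=
  if PySem.Int.mod indice_riga 2 == 1 then
    riga.toList.any (fun e => e != ' ' && e != '*')
  else
    (pvOddCols riga.toList).any (fun e => e != ' ' && e != '*')

-- ===== PRECONDITION & SPEC =====
def Spec_contiene_caratteri_non_conformi (riga : String) (indice_riga : Int) (out : Bool) : Prop := out = contiene_caratteri_non_conformi_alt riga indice_riga
instance (riga : String) (indice_riga : Int) (out : Bool) : Decidable (Spec_contiene_caratteri_non_conformi riga indice_riga out) := by unfold Spec_contiene_caratteri_non_conformi; infer_instance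

-- ===== CLAIM (what is proved, stated in full; the proofs are below) =====
def Claim_equal_contiene_caratteri_non_conformi : Prop := ∀ (riga : String) (indice_riga : Int), Dom_contiene_caratteri_non_conformi riga indice_riga → Spec_contiene_caratteri_non_conformi riga indice_riga (contiene_caratteri_non_conformi riga indice_riga)

-- ===== LEMMAS AND PROOFS =====

theorem pvLoopA_odd (ir : Int) (h : PySem.Int.mod ir 2 == 1) :
    ∀ (xs : List Char) (ic : Int),
      pvLoopA ir xs ic = xs.any (fun e => e != ' ' && e != '*') := by
  intro xs
  induction xs with
  | nil => intro ic; simp [pvLoopA]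
  | cons e rest ih =>
    intro ic
    simp only [pvLoopA, h, if_true, List.any_cons]
    by_cases hb : (e != ' ' && e != '*') = true
    · simp [hb]
    · simp [hb] at *
      simp [ih (ic + 1)]

theorem pvLoopA_even (ir : Int) (h : ¬ (PySem.Int.mod ir 2 == 1) = true) :
    ∀ (xs : List Char) (ic : Int), PySem.Int.mod ic 2 = 0 →
      pvLoopA ir xs ic = (pvOddCols xs).any (fun e => e != ' ' && e != '*') := by
  intro xs
  induction xs using pvOddCols.induct with
  | case1 a e rest ih =>
    intro ic hic
    have h1 : PySem.Int.mod (ic + 1) 2 = 1 := by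
      simp only [PySem.Int.mod_eq_emod_of_pos (by omega : (0:Int) < 2)] at hic ⊢
      omega
    have h2 : PySem.Int.mod (ic + 1 + 1) 2 = 0 := by
      simp only [PySem.Int.mod_eq_emod_of_pos (by omega : (0:Int) < 2)] at hic ⊢
      omega
    simp only [pvLoopA, h, hic, h1, pvOddCols, List.any_cons]
    by_cases hb : (e != ' ' && e != '*') = true
    · simp [hb]
    · simp only [Bool.not_eq_true] at hb
      simp [hb, ih (ic + 1 + 1) h2]
  | case2 xs hshape =>
    intro ic hic
    cases xs with
    | nil => simp [pvLoopA, pvOddCols]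
    | cons a tl =>
      cases tl with
      | nil =>
        have hir : ¬ ir % 2 = 1 := by
          rw [PySem.Int.mod_eq_emod_of_pos (by omega : (0:Int) < 2)] at h
          simpa using h
        have hic' : ¬ ic % 2 = 1 := by
          rw [PySem.Int.mod_eq_emod_of_pos (by omega : (0:Int) < 2)] at hic
          omega
        simp [pvLoopA, pvOddCols, hir, hic']
      | cons b tl2 => exact absurd rfl (hshape a b tl2)

-- ===== VERDICT (by name: the statement is the Claim_ definition above) =====
theorem contiene_caratteri_non_conformi_spec : Claim_equal_contiene_caratteri_non_conformi := by
  intro riga ir _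
  unfold Spec_contiene_caratteri_non_conformi contiene_caratteri_non_conformi contiene_caratteri_non_conformi_alt
  by_cases h : (PySem.Int.mod ir 2 == 1) = true
  · rw [if_pos h, pvLoopA_odd ir h]
  · have h0 : PySem.Int.mod (0 : Int) 2 = 0 := by
      rw [PySem.Int.mod_eq_emod_of_pos (by omega : (0:Int) < 2)]; decide
    rw [if_neg h, pvLoopA_even ir h riga.toList 0 h0]
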